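-- pv_equiv track=rewrite | github.com/i1ich/Computer-Vision | myCV/shape_finder.py | denoise3
-- ===== SOURCE A (Python) =====
-- def is_pixel(x1, y1, data):
--     if data[y1][x1] == 0:
--         return 0
--     return 1
--
-- def neighbors3(x1, y1, data):
--     cnt = 0
--     if is_pixel(x1, y1, data):
--         for i in [-1, 0, 1]:
--             for j in [-1, 0, 1]:
--                 if i == 0 and j == 0:
--                     continue
--                 if is_pixel(x1 + i, y1 + j, data):
--                     cnt += 1
--     return cnt
--
-- def is_noise3(x1, y1, data, tol):
--     if neighbors3(x1, y1, data) < tol and is_pixel(x1, y1, data):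
--         return 1
--     return 0
--
-- def denoise3(datanew, dataold, tol):
--     flag = 0
--     for i in range(len(dataold[0]) - 2):
--         for j in range(len(dataold) - 2):
--             if is_noise3(i + 1, j + 1, dataold, tol):
--                 flag = 1
--                 datanew[j + 1][i + 1] = 0
--     return flag
-- ===== SOURCE B (Python) =====
-- def denoise3(datanew, dataold, tol):
--     rows = len(dataold)
--     cols = len(dataold[0])
--     # pass 1: summed-area table of the nonzero mask:
--     # P[y][x] = number of nonzero entries in dataold[0:y][0:x]
--     P = [[0] * (cols + 1)]
--     for y in range(rows):
--         prev = P[y]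
--         cur = [0]
--         for x in range(cols):
--             cur.append(prev[x + 1] + cur[x] - prev[x] + (dataold[y][x] != 0))
--         P.append(cur)
--     # pass 2: O(1) 3x3 box query per interior pixel via inclusion-exclusion;
--     # subtract the center pixel itself (nonzero here) to get its 8-neighbour count
--     flag = 0
--     for y in range(1, rows - 1):
--         for x in range(1, cols - 1):
--             if dataold[y][x] != 0:
--                 nb = P[y + 2][x + 2] - P[y - 1][x + 2] - P[y + 2][x - 1] + P[y - 1][x - 1] - 1
--                 if nb < tol:
--                     datanew[y][x] = 0
--                     flag = 1
--     return flag
-- ===== Notes on version B (the rewrite author's own statement) =====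
-- stated objective: faster
-- what changed: B replaces A's per-pixel probing of the 8 neighbors (per-cell helper calls re-reading the grid 9 times per pixel) by an integral image (summed-area table) of the nonzero mask built in one pass; the second pass gets each neighbour count from a 4-corner inclusion-exclusion box query minus the center.
-- outside the precondition, e.g. on denoise3([], [[1], [], [2]], 115): A returns 0, B raises IndexError; on denoise3([], [[1], [2, 3]], 5): A returns 0, B returns 0; on denoise3([], [[1, 1, 1], [1, 1, 1], [1, 1, 1]], 0): A returns 0, B returns 0
import Mathlib
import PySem

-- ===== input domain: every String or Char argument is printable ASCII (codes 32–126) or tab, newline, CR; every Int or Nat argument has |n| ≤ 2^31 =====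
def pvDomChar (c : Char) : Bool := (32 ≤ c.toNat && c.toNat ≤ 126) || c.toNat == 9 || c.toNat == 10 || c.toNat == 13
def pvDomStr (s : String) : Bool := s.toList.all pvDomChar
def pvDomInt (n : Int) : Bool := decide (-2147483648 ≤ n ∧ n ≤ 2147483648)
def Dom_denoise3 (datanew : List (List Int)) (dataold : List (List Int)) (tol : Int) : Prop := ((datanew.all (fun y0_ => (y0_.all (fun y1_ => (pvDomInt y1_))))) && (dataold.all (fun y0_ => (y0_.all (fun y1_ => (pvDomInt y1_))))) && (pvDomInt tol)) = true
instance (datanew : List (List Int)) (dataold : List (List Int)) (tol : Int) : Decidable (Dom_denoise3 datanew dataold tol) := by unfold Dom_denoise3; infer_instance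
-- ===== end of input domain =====

-- B replaces A's per-pixel 3x3 neighbor scan by an integral image (summed-area table) of the
-- nonzero mask, answering each neighbor count by a 4-corner box query; same return value.
-- Both A and B mutate datanew in place in Python identically; the equivalence proved here is
-- about the RETURN value only.

-- ===== PORT A =====
def pvIsPixel (x1 y1 : Int) (data : List (List Int)) : Int :=
  if PySem.List.pyGetD (PySem.List.pyGetD data y1 []) x1 0 = 0 then 0 else 1

def pvNeighbors3 (x1 y1 : Int) (data : List (List Int)) : Int :=
  if pvIsPixel x1 y1 data ≠ 0 then
    ([-1, 0, 1] : List Int).foldl (fun cnt i =>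
      ([-1, 0, 1] : List Int).foldl (fun cnt j =>
        if i = 0 ∧ j = 0 then cnt
        else if pvIsPixel (x1 + i) (y1 + j) data ≠ 0 then cnt + 1 else cnt) cnt) 0
  else 0

def pvIsNoise3 (x1 y1 : Int) (data : List (List Int)) (tol : Int) : Int :=
  if pvNeighbors3 x1 y1 data < tol ∧ pvIsPixel x1 y1 data ≠ 0 then 1 else 0

-- datanew[j+1][i+1] = 0, as a pure nested list update
def pvSet2 (rows : List (List Int)) (y x : Int) (v : Int) : List (List Int) :=
  PySem.List.pySetD rows y (PySem.List.pySetD (PySem.List.pyGetD rows y []) x v)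

def denoise3 (datanew : List (List Int)) (dataold : List (List Int)) (tol : Int) : Int :=
  ((PySem.List.pyRange 0 (((PySem.List.pyGetD dataold 0 []).length : Int) - 2) 1).foldl
    (fun (st : List (List Int) × Int) i =>
      (PySem.List.pyRange 0 ((dataold.length : Int) - 2) 1).foldl
        (fun (st : List (List Int) × Int) j =>
          if pvIsNoise3 (i + 1) (j + 1) dataold tol ≠ 0 then
            (pvSet2 st.1 (j + 1) (i + 1) 0, 1)
          else st) st)
    (datanew, 0)).2

-- ===== PORT B =====
-- (dataold[y][x] != 0) as the 0/1 int Python adds into the running sum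
def pvMask (dataold : List (List Int)) (y x : Int) : Int :=
  if PySem.List.pyGetD (PySem.List.pyGetD dataold y []) x 0 ≠ 0 then 1 else 0

-- pass 1 of Source B: the summed-area table P, P[y][x] = # nonzero entries of dataold[0:y][0:x]
def pvSAT (dataold : List (List Int)) : List (List Int) :=
  (PySem.List.pyRange 0 (dataold.length : Int) 1).foldl
    (fun P y =>
      let prev := PySem.List.pyGetD P y []
      let cur := (PySem.List.pyRange 0 ((PySem.List.pyGetD dataold 0 []).length : Int) 1).foldl
        (fun cur x =>
          cur ++ [PySem.List.pyGetD prev (x + 1) 0 + PySem.List.pyGetD cur x 0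
                  - PySem.List.pyGetD prev x 0 + pvMask dataold y x]) [0]
      P ++ [cur])
    [List.replicate ((PySem.List.pyGetD dataold 0 []).length + 1) 0]

def denoise3_alt (datanew : List (List Int)) (dataold : List (List Int)) (tol : Int) : Int :=
  let P := pvSAT dataold
  ((PySem.List.pyRange 1 ((dataold.length : Int) - 1) 1).foldl
    (fun (st : List (List Int) × Int) y =>
      (PySem.List.pyRange 1 (((PySem.List.pyGetD dataold 0 []).length : Int) - 1) 1).foldl
        (fun (st : List (List Int) × Int) x =>
          if PySem.List.pyGetD (PySem.List.pyGetD dataold y []) x 0 ≠ 0 then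
            if PySem.List.pyGetD (PySem.List.pyGetD P (y + 2) []) (x + 2) 0
                 - PySem.List.pyGetD (PySem.List.pyGetD P (y - 1) []) (x + 2) 0
                 - PySem.List.pyGetD (PySem.List.pyGetD P (y + 2) []) (x - 1) 0
                 + PySem.List.pyGetD (PySem.List.pyGetD P (y - 1) []) (x - 1) 0 - 1 < tol then
              (pvSet2 st.1 y x 0, 1)
            else st
          else st) st)
    (datanew, 0)).2

-- ===== PRECONDITION & SPEC =====
-- Pre_ excludes inputs on which the Python A raises IndexError: empty or ragged dataold (a
-- neighbor read lands past a short row), and — when the grid has an interior — a datanew too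
-- small for the assignment datanew[j+1][i+1] = 0 (this also excludes some grids with no noise
-- and a small datanew, and ragged interior-free grids, on which A happens to return 0; B
-- returns 0 there too).
def Pre_denoise3 (datanew : List (List Int)) (dataold : List (List Int)) (tol : Int) : Prop :=
  dataold ≠ [] ∧
  (∀ r ∈ dataold, r.length = (dataold.headD []).length) ∧
  (3 ≤ dataold.length → 3 ≤ (dataold.headD []).length →
    dataold.length ≤ datanew.length ∧ ∀ r ∈ datanew, (dataold.headD []).length ≤ r.length)
instance (datanew : List (List Int)) (dataold : List (List Int)) (tol : Int) : Decidable (Pre_denoise3 datanew dataold tol) := by unfold Pre_denoise3; infer_instance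

def pvWitness_denoise3 : List (List Int) × List (List Int) × Int :=
  ([[0, 1, 0], [1, 1, 1], [0, 1, 0]], [[0, 1, 0], [1, 1, 1], [0, 1, 0]], 2)

def Spec_denoise3 (datanew : List (List Int)) (dataold : List (List Int)) (tol : Int) (out : Int) : Prop := out = denoise3_alt datanew dataold tol
instance (datanew : List (List Int)) (dataold : List (List Int)) (tol : Int) (out : Int) : Decidable (Spec_denoise3 datanew dataold tol out) := by unfold Spec_denoise3; infer_instance

-- ===== CLAIM (what is proved, stated in full; the proofs are below) =====
def Claim_equal_denoise3 : Prop := ∀ (datanew : List (List Int)) (dataold : List (List Int)) (tol : Int), Dom_denoise3 datanew dataold tol → Pre_denoise3 datanew dataold tol → Spec_denoise3 datanew dataold tol (denoise3 datanew dataold tol)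

-- ===== LEMMAS AND PROOFS =====

-- the exact count of the 2-D prefix rectangle [0,y) x [0,x) of the nonzero mask
def pvS (dataold : List (List Int)) (y x : Nat) : Int :=
  ∑ j ∈ Finset.range y, ∑ i ∈ Finset.range x, pvMask dataold (j : Int) (i : Int)

-- one row of that sum
def pvR (dataold : List (List Int)) (y x : Nat) : Int :=
  ∑ i ∈ Finset.range x, pvMask dataold (y : Int) (i : Int)

theorem pvS_succ_row (dataold : List (List Int)) (y x : Nat) :
    pvS dataold (y + 1) x = pvS dataold y x + pvR dataold y x := by
  simp [pvS, pvR, Finset.sum_range_succ]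

theorem pvR_succ (dataold : List (List Int)) (y x : Nat) :
    pvR dataold y (x + 1) = pvR dataold y x + pvMask dataold (y : Int) (x : Int) := by
  simp [pvR, Finset.sum_range_succ]

-- the flag component of a fold whose body sets it to 1 exactly when p fires
theorem pv_fold_flag {α β : Type} (p : α → Bool) (h : β × Int → α → β × Int)
    (hy : ∀ st e, (h st e).2 = if p e then 1 else st.2) :
    ∀ (l : List α) (st : β × Int), (l.foldl h st).2 = if l.any p then 1 else st.2 := by
  intro l
  induction l with
  | nil => intro st; simp
  | cons a t ih =>
    intro st
    simp only [List.foldl_cons, ih, hy, List.any_cons]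
    by_cases hp : p a = true <;> by_cases ht : t.any p = true <;> simp [hp, ht]

theorem pv_isPixel_ne (x y : Int) (data : List (List Int)) :
    (pvIsPixel x y data ≠ 0) ↔ PySem.List.pyGetD (PySem.List.pyGetD data y []) x 0 ≠ 0 := by
  unfold pvIsPixel
  split_ifs with h <;> simp [h]

-- generic shape of A's 3x3 double fold, as a sum of 0/1 indicators over the offset lists
theorem pv_count_swap (p : Int → Int → Prop) [inst : ∀ i j, Decidable (p i j)] :
    ([-1, 0, 1] : List Int).foldl (fun cnt i =>
      ([-1, 0, 1] : List Int).foldl (fun cnt j =>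
        if i = 0 ∧ j = 0 then cnt
        else if p i j then cnt + 1 else cnt) cnt) (0 : Int)
    = (([-1, 0, 1] : List Int).map (fun i =>
        (([-1, 0, 1] : List Int).map (fun j =>
          if ¬(i = 0 ∧ j = 0) ∧ p i j then (1 : Int) else 0)).sum)).sum := by
  have hA : ∀ (i c : Int),
      ([-1, 0, 1] : List Int).foldl (fun cnt j =>
        if i = 0 ∧ j = 0 then cnt else if p i j then cnt + 1 else cnt) c
      = c + (([-1, 0, 1] : List Int).map (fun j =>
          if ¬(i = 0 ∧ j = 0) ∧ p i j then (1 : Int) else 0)).sum := by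
    intro i c
    rw [← PySem.List.foldl_add]
    apply PySem.List.foldl_congr_mem
    intro acc j _
    by_cases h1 : i = 0 ∧ j = 0 <;> by_cases h2 : p i j <;> simp [h1, h2]
  rw [PySem.List.foldl_congr_mem _ _ (fun c i => c + (([-1, 0, 1] : List Int).map (fun j =>
        if ¬(i = 0 ∧ j = 0) ∧ p i j then (1 : Int) else 0)).sum) _ (fun c i _ => hA i c)]
  rw [PySem.List.foldl_add]
  simp

-- A's 8-neighbor count at a nonzero pixel, as the 3x3 block sum of the mask minus the center
theorem pv_nb_sum (dataold : List (List Int)) (a b : Nat)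
    (hp : PySem.List.pyGetD (PySem.List.pyGetD dataold ((a : Int) + 1) []) ((b : Int) + 1) 0 ≠ 0) :
    pvNeighbors3 ((b : Int) + 1) ((a : Int) + 1) dataold =
      (∑ j ∈ Finset.range 3, ∑ i ∈ Finset.range 3,
        pvMask dataold ((a + j : Nat) : Int) ((b + i : Nat) : Int)) - 1 := by
  unfold pvNeighbors3
  rw [if_pos ((pv_isPixel_ne _ _ _).2 hp)]
  simp only [pv_isPixel_ne]
  rw [pv_count_swap (p := fun i j =>
    PySem.List.pyGetD (PySem.List.pyGetD dataold ((a : Int) + 1 + j) []) ((b : Int) + 1 + i) 0 ≠ 0)]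
  simp only [List.map_cons, List.map_nil, List.sum_cons, List.sum_nil,
             Finset.sum_range_succ, Finset.sum_range_zero, pvMask]
  norm_num
  ring_nf
  ring_nf at hp
  rw [if_neg hp]
  ring

-- the row built by the inner loop of pass 1, given that prev is row n of the true table
theorem pv_row_eq (dataold : List (List Int)) (n : Nat) :
    ∀ k, k ≤ (PySem.List.pyGetD dataold 0 []).length →
    (PySem.List.pyRange 0 (k : Int) 1).foldl
      (fun cur x =>
        cur ++ [PySem.List.pyGetD ((List.range ((PySem.List.pyGetD dataold 0 []).length + 1)).map
                    (fun x => pvS dataold n x)) (x + 1) 0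
                + PySem.List.pyGetD cur x 0
                - PySem.List.pyGetD ((List.range ((PySem.List.pyGetD dataold 0 []).length + 1)).map
                    (fun x => pvS dataold n x)) x 0
                + pvMask dataold (n : Int) x]) [0]
    = (List.range (k + 1)).map (fun x => pvS dataold (n + 1) x) := by
  intro k
  induction k with
  | zero =>
    intro _
    rw [PySem.List.pyRange_one_eq_nil (by norm_num)]
    simp [pvS]
  | succ k ih =>
    intro hk
    have h1 : ((k + 1 : Nat) : Int) = (k : Int) + 1 := by push_cast; ring
    rw [h1, PySem.List.pyRange_one_succ_right (by positivity), List.foldl_append,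
        ih (by omega), List.foldl_cons, List.foldl_nil]
    have g1 : PySem.List.pyGetD ((List.range ((PySem.List.pyGetD dataold 0 []).length + 1)).map
        (fun x => pvS dataold n x)) ((k : Int) + 1) 0 = pvS dataold n (k + 1) := by
      rw [show ((k : Int) + 1) = ((k + 1 : Nat) : Int) from by push_cast; ring,
          PySem.List.pyGetD_natCast, PySem.List.getD_map_range _ _ _ _ (by omega)]
    have g2 : PySem.List.pyGetD ((List.range (k + 1)).map (fun x => pvS dataold (n + 1) x))
        ((k : Int)) 0 = pvS dataold (n + 1) k := by
      rw [PySem.List.pyGetD_natCast, PySem.List.getD_map_range _ _ _ _ (by omega)]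
    have g3 : PySem.List.pyGetD ((List.range ((PySem.List.pyGetD dataold 0 []).length + 1)).map
        (fun x => pvS dataold n x)) ((k : Int)) 0 = pvS dataold n k := by
      rw [PySem.List.pyGetD_natCast, PySem.List.getD_map_range _ _ _ _ (by omega)]
    rw [g1, g2, g3]
    have hrec : pvS dataold n (k + 1) + pvS dataold (n + 1) k - pvS dataold n k
        + pvMask dataold (n : Int) (k : Int) = pvS dataold (n + 1) (k + 1) := by
      rw [pvS_succ_row, pvS_succ_row, pvR_succ]
      ring
    rw [hrec]
    simp [List.range_succ]

-- SAT correctness: the table built by pass 1 is exactly the prefix-count table pvS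
theorem pv_sat_eq (dataold : List (List Int)) :
    pvSAT dataold = (List.range (dataold.length + 1)).map
      (fun y => (List.range ((PySem.List.pyGetD dataold 0 []).length + 1)).map
        (fun x => pvS dataold y x)) := by
  have key : ∀ (n : Nat),
      (PySem.List.pyRange 0 (n : Int) 1).foldl
        (fun P y =>
          let prev := PySem.List.pyGetD P y []
          let cur := (PySem.List.pyRange 0 ((PySem.List.pyGetD dataold 0 []).length : Int) 1).foldl
            (fun cur x =>
              cur ++ [PySem.List.pyGetD prev (x + 1) 0 + PySem.List.pyGetD cur x 0
                      - PySem.List.pyGetD prev x 0 + pvMask dataold y x]) [0]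
          P ++ [cur])
        [List.replicate ((PySem.List.pyGetD dataold 0 []).length + 1) 0]
      = (List.range (n + 1)).map
          (fun y => (List.range ((PySem.List.pyGetD dataold 0 []).length + 1)).map
            (fun x => pvS dataold y x)) := by
    intro n
    induction n with
    | zero =>
      rw [Nat.cast_zero, show PySem.List.pyRange (0:Int) 0 = [] from PySem.List.pyRange_one_eq_nil le_rfl]
      simp only [List.foldl_nil, zero_add, List.range_one, List.map_cons, List.map_nil]
      have h0 : (List.range ((PySem.List.pyGetD dataold 0 []).length + 1)).map
          (fun x => pvS dataold 0 x) = List.replicate ((PySem.List.pyGetD dataold 0 []).length + 1) 0 := by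
        simp [pvS]
      exact congrArg (fun l => [l]) h0.symm
    | succ n ih =>
      have h1 : ((n + 1 : Nat) : Int) = (n : Int) + 1 := by push_cast; ring
      rw [h1, PySem.List.pyRange_one_succ_right (by positivity), List.foldl_append, ih,
          List.foldl_cons, List.foldl_nil]
      show (List.range (n + 1)).map _ ++ [_] = _
      have hprev : PySem.List.pyGetD ((List.range (n + 1)).map
          (fun y => (List.range ((PySem.List.pyGetD dataold 0 []).length + 1)).map
            (fun x => pvS dataold y x))) ((n : Int)) []
          = (List.range ((PySem.List.pyGetD dataold 0 []).length + 1)).map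
            (fun x => pvS dataold n x) := by
        rw [PySem.List.pyGetD_natCast, PySem.List.getD_map_range _ _ _ _ (by omega)]
      rw [hprev, pv_row_eq dataold n _ le_rfl]
      simp [List.range_succ]
  rw [pvSAT, key dataold.length]

-- inclusion-exclusion: the 4-corner query of pvS is the 3x3 block sum of the mask
theorem pv_block (dataold : List (List Int)) (a b : Nat) :
    pvS dataold (a + 3) (b + 3) - pvS dataold a (b + 3)
      - pvS dataold (a + 3) b + pvS dataold a b =
      ∑ j ∈ Finset.range 3, ∑ i ∈ Finset.range 3,
        pvMask dataold ((a + j : Nat) : Int) ((b + i : Nat) : Int) := by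
  have e1 : ∀ x, pvS dataold (a + 3) x
      = pvS dataold a x + pvR dataold a x + pvR dataold (a + 1) x + pvR dataold (a + 2) x := by
    intro x
    rw [show a + 3 = (a + 2) + 1 from rfl, pvS_succ_row,
        show a + 2 = (a + 1) + 1 from rfl, pvS_succ_row, pvS_succ_row]
  have e2 : ∀ y, pvR dataold y (b + 3)
      = pvR dataold y b + pvMask dataold (y : Int) ((b : Nat) : Int)
        + pvMask dataold (y : Int) ((b + 1 : Nat) : Int)
        + pvMask dataold (y : Int) ((b + 2 : Nat) : Int) := by
    intro y
    rw [show b + 3 = (b + 2) + 1 from rfl, pvR_succ,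
        show b + 2 = (b + 1) + 1 from rfl, pvR_succ, pvR_succ]
  rw [e1, e1, e2, e2, e2]
  simp [Finset.sum_range_succ]
  ring

-- pointwise: A's noise test at interior (x, y) = B's box-query test there
theorem pv_point (dataold : List (List Int)) (tol x y : Int)
    (hx0 : 1 ≤ x) (hx1 : x < ((PySem.List.pyGetD dataold 0 []).length : Int) - 1)
    (hy0 : 1 ≤ y) (hy1 : y < (dataold.length : Int) - 1) :
    (pvIsNoise3 x y dataold tol ≠ 0) ↔
      (PySem.List.pyGetD (PySem.List.pyGetD dataold y []) x 0 ≠ 0 ∧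
       PySem.List.pyGetD (PySem.List.pyGetD (pvSAT dataold) (y + 2) []) (x + 2) 0
         - PySem.List.pyGetD (PySem.List.pyGetD (pvSAT dataold) (y - 1) []) (x + 2) 0
         - PySem.List.pyGetD (PySem.List.pyGetD (pvSAT dataold) (y + 2) []) (x - 1) 0
         + PySem.List.pyGetD (PySem.List.pyGetD (pvSAT dataold) (y - 1) []) (x - 1) 0 - 1 < tol) := by
  obtain ⟨a, rfl⟩ : ∃ a : Nat, y = (a : Int) + 1 := ⟨(y - 1).toNat, by omega⟩
  obtain ⟨b, rfl⟩ : ∃ b : Nat, x = (b : Int) + 1 := ⟨(x - 1).toNat, by omega⟩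
  have hA : a + 3 ≤ dataold.length := by omega
  have hB : b + 3 ≤ (PySem.List.pyGetD dataold 0 []).length := by omega
  have L : ∀ (p q : Nat), p ≤ dataold.length → q ≤ (PySem.List.pyGetD dataold 0 []).length →
      PySem.List.pyGetD (PySem.List.pyGetD (pvSAT dataold) ((p : Int)) []) ((q : Int)) 0
        = pvS dataold p q := by
    intro p q hp hq
    rw [pv_sat_eq, PySem.List.pyGetD_natCast, PySem.List.pyGetD_natCast,
        PySem.List.getD_map_range _ _ _ _ (by omega), PySem.List.getD_map_range _ _ _ _ (by omega)]
  rw [show ((a : Int) + 1 + 2) = ((a + 3 : Nat) : Int) from by push_cast; ring,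
      show ((a : Int) + 1 - 1) = ((a : Nat) : Int) from by ring,
      show ((b : Int) + 1 + 2) = ((b + 3 : Nat) : Int) from by push_cast; ring,
      show ((b : Int) + 1 - 1) = ((b : Nat) : Int) from by ring,
      L _ _ hA hB, L _ _ (by omega) hB, L _ _ hA (by omega), L _ _ (by omega) (by omega)]
  have key : (pvIsNoise3 ((b : Int) + 1) ((a : Int) + 1) dataold tol ≠ 0) ↔
      (pvNeighbors3 ((b : Int) + 1) ((a : Int) + 1) dataold < tol ∧
       pvIsPixel ((b : Int) + 1) ((a : Int) + 1) dataold ≠ 0) := by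
    unfold pvIsNoise3
    split_ifs with h <;> simp [h]
  rw [key, pv_isPixel_ne]
  constructor
  · rintro ⟨hlt, hp⟩
    refine ⟨hp, ?_⟩
    rw [pv_block, ← pv_nb_sum dataold a b hp]
    exact hlt
  · rintro ⟨hp, hlt⟩
    refine ⟨?_, hp⟩
    rw [pv_nb_sum dataold a b hp, ← pv_block]
    exact hlt

-- A's result as "any interior noise pixel"
theorem pv_A_eq (datanew dataold : List (List Int)) (tol : Int) :
    denoise3 datanew dataold tol =
      if (PySem.List.pyRange 0 (((PySem.List.pyGetD dataold 0 []).length : Int) - 2) 1).any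
          (fun i => (PySem.List.pyRange 0 ((dataold.length : Int) - 2) 1).any
            (fun j => pvIsNoise3 (i + 1) (j + 1) dataold tol != 0))
      then 1 else 0 := by
  have hinner : ∀ (i : Int) (st : List (List Int) × Int),
      ((PySem.List.pyRange 0 ((dataold.length : Int) - 2) 1).foldl
        (fun (st : List (List Int) × Int) j =>
          if pvIsNoise3 (i + 1) (j + 1) dataold tol ≠ 0 then
            (pvSet2 st.1 (j + 1) (i + 1) 0, 1)
          else st) st).2
      = if (PySem.List.pyRange 0 ((dataold.length : Int) - 2) 1).any
            (fun j => pvIsNoise3 (i + 1) (j + 1) dataold tol != 0) then 1 else st.2 := by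
    intro i st
    exact pv_fold_flag _ _
      (fun st j => by by_cases hc : pvIsNoise3 (i + 1) (j + 1) dataold tol ≠ 0 <;> simp [hc]) _ st
  unfold denoise3
  rw [pv_fold_flag _ _ (fun st i => hinner i st)]

-- B's result as "any interior pixel whose box query is below tol"
theorem pv_B_eq (datanew dataold : List (List Int)) (tol : Int) :
    denoise3_alt datanew dataold tol =
      if (PySem.List.pyRange 1 ((dataold.length : Int) - 1) 1).any
          (fun y => (PySem.List.pyRange 1 (((PySem.List.pyGetD dataold 0 []).length : Int) - 1) 1).any
            (fun x => decide (PySem.List.pyGetD (PySem.List.pyGetD dataold y []) x 0 ≠ 0 ∧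
              PySem.List.pyGetD (PySem.List.pyGetD (pvSAT dataold) (y + 2) []) (x + 2) 0
                - PySem.List.pyGetD (PySem.List.pyGetD (pvSAT dataold) (y - 1) []) (x + 2) 0
                - PySem.List.pyGetD (PySem.List.pyGetD (pvSAT dataold) (y + 2) []) (x - 1) 0
                + PySem.List.pyGetD (PySem.List.pyGetD (pvSAT dataold) (y - 1) []) (x - 1) 0 - 1 < tol)))
      then 1 else 0 := by
  have hinner : ∀ (y : Int) (st : List (List Int) × Int),
      ((PySem.List.pyRange 1 (((PySem.List.pyGetD dataold 0 []).length : Int) - 1) 1).foldl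
        (fun (st : List (List Int) × Int) x =>
          if PySem.List.pyGetD (PySem.List.pyGetD dataold y []) x 0 ≠ 0 then
            if PySem.List.pyGetD (PySem.List.pyGetD (pvSAT dataold) (y + 2) []) (x + 2) 0
                 - PySem.List.pyGetD (PySem.List.pyGetD (pvSAT dataold) (y - 1) []) (x + 2) 0
                 - PySem.List.pyGetD (PySem.List.pyGetD (pvSAT dataold) (y + 2) []) (x - 1) 0
                 + PySem.List.pyGetD (PySem.List.pyGetD (pvSAT dataold) (y - 1) []) (x - 1) 0 - 1 < tol then
              (pvSet2 st.1 y x 0, 1)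
            else st
          else st) st).2
      = if (PySem.List.pyRange 1 (((PySem.List.pyGetD dataold 0 []).length : Int) - 1) 1).any
            (fun x => decide (PySem.List.pyGetD (PySem.List.pyGetD dataold y []) x 0 ≠ 0 ∧
              PySem.List.pyGetD (PySem.List.pyGetD (pvSAT dataold) (y + 2) []) (x + 2) 0
                - PySem.List.pyGetD (PySem.List.pyGetD (pvSAT dataold) (y - 1) []) (x + 2) 0
                - PySem.List.pyGetD (PySem.List.pyGetD (pvSAT dataold) (y + 2) []) (x - 1) 0
                + PySem.List.pyGetD (PySem.List.pyGetD (pvSAT dataold) (y - 1) []) (x - 1) 0 - 1 < tol))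
        then 1 else st.2 := by
    intro y st
    refine pv_fold_flag _ _ (fun st x => ?_) _ st
    by_cases h1 : PySem.List.pyGetD (PySem.List.pyGetD dataold y []) x 0 ≠ 0 <;>
      by_cases h2 : PySem.List.pyGetD (PySem.List.pyGetD (pvSAT dataold) (y + 2) []) (x + 2) 0
          - PySem.List.pyGetD (PySem.List.pyGetD (pvSAT dataold) (y - 1) []) (x + 2) 0
          - PySem.List.pyGetD (PySem.List.pyGetD (pvSAT dataold) (y + 2) []) (x - 1) 0
          + PySem.List.pyGetD (PySem.List.pyGetD (pvSAT dataold) (y - 1) []) (x - 1) 0 - 1 < tol <;>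
      simp [h1, h2]
  simp only [denoise3_alt]
  rw [pv_fold_flag _ _ (fun st y => hinner y st)]

-- ===== VERDICT (by name: the statement is the Claim_ definition above) =====
theorem denoise3_spec : Claim_equal_denoise3 := by
  intro datanew dataold tol _dom _pre
  unfold Spec_denoise3
  rw [pv_A_eq, pv_B_eq]
  congr 1
  simp only [List.any_eq_true, bne_iff_ne, decide_eq_true_eq, PySem.List.mem_pyRange_one]
  apply propext
  constructor
  · rintro ⟨i, hi, j, hj, hP⟩
    refine ⟨j + 1, by omega, i + 1, by omega, ?_⟩
    exact (pv_point dataold tol (i + 1) (j + 1) (by omega) (by omega) (by omega) (by omega)).1 hP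
  · rintro ⟨y, hy, x, hx, hQ⟩
    refine ⟨x - 1, by omega, y - 1, by omega, ?_⟩
    have hx1 : x - 1 + 1 = x := by omega
    have hy1 : y - 1 + 1 = y := by omega
    rw [hx1, hy1]
    exact (pv_point dataold tol x y (by omega) (by omega) (by omega) (by omega)).2 hQ
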